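-- pv_equiv track=rewrite | github.com/CongLabCode/DPAM | docker/scripts/step25_generate_pdbs.py | get_domain_range
-- ===== SOURCE A (Python) =====
-- def get_domain_range(resids):
--     segs = []
--     resids.sort()
--     for resid in resids:
--         if not segs:
--             segs.append([resid])
--         else:
--             if resid > segs[-1][-1] + 1:
--                 segs.append([resid])
--             else:
--                 segs[-1].append(resid)
--     seg_string = []
--     for seg in segs:
--         start = str(seg[0])
--         end = str(seg[-1])
--         seg_string.append(f'{start}-{end}')
--     return ','.join(seg_string)
-- ===== SOURCE B (Python) =====
-- def get_domain_range(resids):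
--     resids.sort()  # keep A's observable in-place sort
--     u = sorted(set(resids))
--     if not u:
--         return ''
--     out = str(u[0])
--     for a, b in zip(u, u[1:]):
--         if b != a + 1:
--             out += f'-{a},{b}'
--     return out + f'-{u[-1]}'
-- ===== Notes on version B (the rewrite author's own statement) =====
-- stated objective: alternative
-- what changed: Instead of accumulating mutable segment lists and rendering them in a second pass, B deduplicates via sorted(set(...)) and emits the range string directly in one pass over adjacent pairs, writing '-a,b' at every break; no segment structure is built.
import Mathlib
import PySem

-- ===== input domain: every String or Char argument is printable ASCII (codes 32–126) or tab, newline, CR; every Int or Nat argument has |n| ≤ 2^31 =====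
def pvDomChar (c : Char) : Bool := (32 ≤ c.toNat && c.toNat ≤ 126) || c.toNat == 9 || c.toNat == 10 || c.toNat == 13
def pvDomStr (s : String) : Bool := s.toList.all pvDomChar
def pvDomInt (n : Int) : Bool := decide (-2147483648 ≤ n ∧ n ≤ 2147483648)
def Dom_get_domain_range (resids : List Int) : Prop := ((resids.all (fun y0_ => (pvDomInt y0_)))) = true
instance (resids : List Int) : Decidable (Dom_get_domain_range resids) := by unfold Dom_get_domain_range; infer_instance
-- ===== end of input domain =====

-- B replaces A's mutable segment lists + second rendering pass by a single pass over adjacent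
-- pairs of the sorted deduplicated residues that emits the range string directly (alternative
-- decomposition, same cost).  Both A and B sort `resids` in place; the equivalence proved here
-- is about the RETURN value.

-- ===== PORT A =====
-- A's `segs` is held newest-segment-first and each segment newest-element-first, so Python's
-- `segs[-1][-1]` is the head of the head and both appends are conses; the stored values and
-- branch tests are exactly A's.
def aStep (segs : List (List Int)) (r : Int) : List (List Int) :=
  match segs with
  | [] => [[r]]                                        -- if not segs: segs.append([resid])
  | seg :: rest =>
      if r > seg.headD 0 + 1 then [r] :: seg :: rest   -- segs.append([resid])
      else (r :: seg) :: rest                          -- segs[-1].append(resid)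

def get_domain_range (resids : List Int) : String :=
  let s := PySem.List.sorted resids (fun x => x) false   -- resids.sort()
  let segs := s.foldl aStep []
  -- second loop: for seg in segs: seg_string.append(f'{str(seg[0])}-{str(seg[-1])}')
  let seg_string := segs.reverse.foldl
    (fun acc seg => acc ++ [String.ofList (PySem.Int.toChars (seg.getLastD 0) ++ '-' :: PySem.Int.toChars (seg.headD 0))]) []
  PySem.Str.join "," seg_string

-- ===== PORT B =====
def get_domain_range_alt (resids : List Int) : String :=
  -- resids.sort() is an in-place mutation only; B's value uses u = sorted(set(resids))
  let u := PySem.List.sorted (PySem.Set.ofList resids) (fun x => x) false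
  if u = [] then ""                                    -- if not u: return ''
  else
    -- out = str(u[0]); for a, b in zip(u, u[1:]): if b != a+1: out += f'-{a},{b}'
    let out := (List.zip u u.tail).foldl
      (fun acc p => if p.2 ≠ p.1 + 1
        then acc ++ '-' :: PySem.Int.toChars p.1 ++ ',' :: PySem.Int.toChars p.2
        else acc)
      (PySem.Int.toChars (u.headD 0))
    String.ofList (out ++ '-' :: PySem.Int.toChars (u.getLastD 0))   -- return out + f'-{u[-1]}'

-- ===== PRECONDITION & SPEC =====
def Spec_get_domain_range (resids : List Int) (out : String) : Prop := out = get_domain_range_alt resids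
instance (resids : List Int) (out : String) : Decidable (Spec_get_domain_range resids out) := by unfold Spec_get_domain_range; infer_instance

-- ===== CLAIM (what is proved, stated in full; the proofs are below) =====
def Claim_equal_get_domain_range : Prop := ∀ (resids : List Int), Dom_get_domain_range resids → Spec_get_domain_range resids (get_domain_range resids)

-- ===== LEMMAS AND PROOFS =====

def pieces (segs : List (List Int)) : List (Int × Int) :=
  segs.reverse.map (fun g => (g.getLastD 0, g.headD 0))

def eatA (c : Int) : List Int → Int × List Int
  | [] => (c, [])
  | y :: t => if y > c + 1 then (c, y :: t) else eatA y t

lemma eatA_len (c : Int) (t : List Int) : (eatA c t).2.length ≤ t.length := by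
  induction t generalizing c with
  | nil => simp [eatA]
  | cons y t ih =>
      simp only [eatA]; split
      · simp
      · exact le_trans (ih y) (Nat.le_succ _)

def runsA : List Int → List (Int × Int)
  | [] => []
  | x :: t => (x, (eatA x t).1) :: runsA (eatA x t).2
termination_by l => l.length
decreasing_by simpa using Nat.lt_succ_of_le (eatA_len x t)

def chop (c : Int) : List Int → Int × List Int
  | [] => (c, [])
  | y :: t => if y = c + 1 then chop y t else (c, y :: t)

lemma chop_len (c : Int) (t : List Int) : (chop c t).2.length ≤ t.length := by
  induction t generalizing c with
  | nil => simp [chop]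
  | cons y t ih =>
      simp only [chop]; split
      · exact le_trans (ih y) (Nat.le_succ _)
      · simp

def runs : List Int → List (Int × Int)
  | [] => []
  | x :: t => (x, (chop x t).1) :: runs (chop x t).2
termination_by l => l.length
decreasing_by simpa using Nat.lt_succ_of_le (chop_len x t)

def dd (p : Int) : List Int → List Int
  | [] => []
  | a :: t => if a = p then dd p t else a :: dd a t

def dedupAdj : List Int → List Int
  | [] => []
  | x :: t => x :: dd x t

def pieceChars (p : Int × Int) : List Char :=
  PySem.Int.toChars p.1 ++ '-' :: PySem.Int.toChars p.2

def renderRuns : List (Int × Int) → List Char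
  | [] => []
  | [p] => pieceChars p
  | p :: q :: rs => pieceChars p ++ ',' :: renderRuns (q :: rs)

def tailRender : List (Int × Int) → List Char
  | [] => []
  | q :: rs => ',' :: renderRuns (q :: rs)

lemma renderRuns_cons (p : Int × Int) (rs : List (Int × Int)) :
    renderRuns (p :: rs) = pieceChars p ++ tailRender rs := by
  cases rs <;> simp [renderRuns, tailRender]

def bTail (x : Int) : List Int → List Char
  | [] => '-' :: PySem.Int.toChars x
  | y :: t => (if y ≠ x + 1 then '-' :: PySem.Int.toChars x ++ ',' :: PySem.Int.toChars y else []) ++ bTail y t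

lemma aStep_prefix (t : List Int) (c : Int) (seg : List Int) (rest : List (List Int)) :
    List.foldl aStep ((c :: seg) :: rest) t = List.foldl aStep [c :: seg] t ++ rest := by
  induction t generalizing c seg rest with
  | nil => simp
  | cons y t ih =>
      simp only [List.foldl_cons, aStep, List.headD_cons]
      split
      · rw [show ([y] :: (c::seg) :: rest : List (List Int)) = (y :: []) :: ((c::seg) :: rest) from rfl,
            ih y [] ((c::seg) :: rest), ih y [] [c::seg]]
        simp
      · exact ih y (c :: seg) rest

lemma fold_pieces (t : List Int) (c : Int) (seg : List Int) :
    pieces (List.foldl aStep [c :: seg] t)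
      = ((c :: seg).getLastD 0, (eatA c t).1) :: runsA (eatA c t).2 := by
  induction t generalizing c seg with
  | nil => simp [pieces, eatA, runsA]
  | cons y t ih =>
      simp only [List.foldl_cons, aStep, List.headD_cons, eatA]
      split
      · rw [show ([y] :: [c::seg] : List (List Int)) = (y :: []) :: [c::seg] from rfl,
            aStep_prefix t y [] [c::seg]]
        have hp : ∀ (L : List (List Int)) (g : List Int),
            pieces (L ++ [g]) = (g.getLastD 0, g.headD 0) :: pieces L := by
          intro L g; simp [pieces]
        rw [hp, ih y []]
        rw [runsA]
        simp
      · rw [ih y (c :: seg)]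
        simp

lemma mem_dd (t : List Int) (p z : Int) : z ∈ p :: dd p t ↔ z = p ∨ z ∈ t := by
  induction t generalizing p with
  | nil => simp [dd]
  | cons a t ih =>
      simp only [dd]
      split
      · subst_vars; rw [ih]; simp
      · have h2 := ih a
        simp only [List.mem_cons] at *
        tauto

lemma dd_pairwise_lt (t : List Int) (p : Int) (h : (p :: t).Pairwise (· ≤ ·)) :
    (p :: dd p t).Pairwise (· < ·) := by
  induction t generalizing p with
  | nil => simp [dd]
  | cons a t ih =>
      rcases List.pairwise_cons.1 h with ⟨hp, ht⟩
      rcases List.pairwise_cons.1 ht with ⟨ha, ht'⟩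
      simp only [dd]
      split
      · subst_vars
        exact ih p (List.pairwise_cons.2 ⟨ha, ht'⟩)
      · rename_i hne
        have hpa : p < a := lt_of_le_of_ne (hp a (by simp)) (by omega)
        have htail := ih a ht
        refine List.pairwise_cons.2 ⟨?_, htail⟩
        intro z hz
        rcases (mem_dd t a z).1 hz with h1 | h1
        · omega
        · have := ha z h1; omega

lemma eatA_spec (t : List Int) (c : Int) (h : (c :: t).Pairwise (· ≤ ·)) :
    chop c (dd c t) = ((eatA c t).1, dd (eatA c t).1 (eatA c t).2)
    ∧ (eatA c t).2.Pairwise (· ≤ ·)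
    ∧ ∀ z ∈ (eatA c t).2, (eatA c t).1 + 1 < z := by
  induction t generalizing c with
  | nil => simp [eatA, dd, chop]
  | cons y t ih =>
      rcases List.pairwise_cons.1 h with ⟨hc, ht⟩
      rcases List.pairwise_cons.1 ht with ⟨hy, ht'⟩
      have hcy : c ≤ y := hc y (by simp)
      simp only [eatA]
      split
      · rename_i hgt
        refine ⟨?_, ht, ?_⟩
        · simp only [dd, if_neg (by omega : ¬ y = c)]
          simp [chop, if_neg (by omega : ¬ y = c + 1)]
        · intro z hz
          rcases List.mem_cons.1 hz with h1 | h1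
          · omega
          · have := hy z h1; omega
      · rename_i hle
        have hyt : (y :: t).Pairwise (· ≤ ·) := ht
        rcases ih y hyt with ⟨h1, h2, h3⟩
        refine ⟨?_, h2, h3⟩
        rcases (by omega : y = c ∨ y = c + 1) with h4 | h4
        · subst h4; simpa [dd] using h1
        · simp only [dd, if_neg (by omega : ¬ y = c)]
          rw [chop, if_pos h4]
          exact h1

lemma runsA_eq_runs_aux (n : Nat) : ∀ (s : List Int), s.length ≤ n → s.Pairwise (· ≤ ·) →
    runsA s = runs (dedupAdj s) := by
  induction n with
  | zero =>
      intro s hs _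
      have h0 : s = [] := List.length_eq_zero_iff.1 (Nat.le_zero.1 hs)
      subst h0; simp [runsA, runs, dedupAdj]
  | succ n ih =>
      intro s hs hp
      match s with
      | [] => simp [runsA, runs, dedupAdj]
      | x :: t =>
          rcases eatA_spec t x hp with ⟨h1, h2, h3⟩
          have ha : runsA (x :: t) = (x, (eatA x t).1) :: runsA (eatA x t).2 := by
            rw [runsA]
          have hb : runs (dedupAdj (x :: t)) = (x, (chop x (dd x t)).1) :: runs (chop x (dd x t)).2 := by
            rw [show dedupAdj (x :: t) = x :: dd x t from rfl, runs]
          rw [ha, hb, h1]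
          refine congrArg₂ _ rfl ?_
          rcases heq : (eatA x t).2 with _ | ⟨y, t'⟩
          · simp [dd, runsA, runs]
          · have hy : (eatA x t).1 + 1 < y := by
              have := h3 y (by rw [heq]; simp); omega
            have hdd : dd (eatA x t).1 (y :: t') = y :: dd y t' := by
              rw [dd, if_neg (by omega)]
            rw [hdd]
            have hlen : (y :: t').length ≤ n := by
              have h5 := eatA_len x t
              rw [heq] at h5
              simp at h5 hs ⊢; omega
            have := ih (y :: t') hlen (heq ▸ h2)
            simpa [dedupAdj] using this

lemma sorted_set_eq_dedupAdj (resids : List Int) :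
    PySem.List.sorted (PySem.Set.ofList resids) (fun x => x) false
      = dedupAdj (PySem.List.sorted resids (fun x => x) false) := by
  have hp : (PySem.List.sorted resids (fun x => x) false).Pairwise (· ≤ ·) :=
    PySem.List.sorted_pairwise resids (fun x => x)
  have hlt : (dedupAdj (PySem.List.sorted resids (fun x => x) false)).Pairwise (· < ·) := by
    rcases heq : PySem.List.sorted resids (fun x => x) false with _ | ⟨x, t⟩
    · simp [dedupAdj]
    · exact dd_pairwise_lt t x (heq ▸ hp)
  have hmem : ∀ z, z ∈ dedupAdj (PySem.List.sorted resids (fun x => x) false) ↔ z ∈ resids := by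
    intro z
    rcases heq : PySem.List.sorted resids (fun x => x) false with _ | ⟨x, t⟩
    · constructor
      · intro h; simp [dedupAdj] at h
      · intro h
        have := (PySem.List.sorted_perm resids (fun x => x) false).mem_iff.2 h
        rw [heq] at this; simp at this
    · rw [show dedupAdj (x :: t) = x :: dd x t from rfl, mem_dd]
      rw [← List.mem_cons, ← heq]
      exact (PySem.List.sorted_perm resids (fun x => x) false).mem_iff
  apply PySem.List.sorted_eq_of_perm_of_pairwise_lt
  · rw [List.perm_ext_iff_of_nodup (hlt.imp fun h => ne_of_lt h) (PySem.Set.nodup_ofList resids)]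
    intro a
    rw [hmem a, PySem.Set.mem_ofList]
  · exact hlt

lemma bfold (t : List Int) (x : Int) (acc : List Char) :
    (List.zip (x :: t) t).foldl
        (fun acc p => if p.2 ≠ p.1 + 1
          then acc ++ '-' :: PySem.Int.toChars p.1 ++ ',' :: PySem.Int.toChars p.2
          else acc) acc
      ++ '-' :: PySem.Int.toChars ((x :: t).getLastD 0)
    = acc ++ bTail x t := by
  induction t generalizing x acc with
  | nil => simp [bTail]
  | cons y t ih =>
      rw [List.zip_cons_cons, List.foldl_cons]
      have hl : ((x :: y :: t).getLastD 0) = ((y :: t).getLastD 0) := by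
        simp
      rw [hl, ih]
      rw [show bTail x (y :: t)
          = (if y ≠ x + 1 then '-' :: PySem.Int.toChars x ++ ',' :: PySem.Int.toChars y else []) ++ bTail y t from rfl]
      split <;> simp

lemma bTail_eq (t : List Int) (x : Int) :
    bTail x t = '-' :: PySem.Int.toChars (chop x t).1 ++ tailRender (runs (chop x t).2) := by
  induction t generalizing x with
  | nil => simp [bTail, chop, runs, tailRender]
  | cons y t' ih =>
      rw [show bTail x (y :: t')
          = (if y ≠ x + 1 then '-' :: PySem.Int.toChars x ++ ',' :: PySem.Int.toChars y else []) ++ bTail y t' from rfl]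
      by_cases hc : y = x + 1
      · rw [chop, if_pos hc, if_neg (by omega), List.nil_append]
        exact ih y
      · rw [chop, if_neg hc, if_pos (by omega)]
        have h2 : runs (y :: t') = (y, (chop y t').1) :: runs (chop y t').2 := by rw [runs]
        rw [show (((x, y :: t') : Int × List Int)).2 = y :: t' from rfl,
            show (((x, y :: t') : Int × List Int)).1 = x from rfl,
            show tailRender (runs (y :: t')) = ',' :: renderRuns (runs (y :: t')) by rw [h2]; rfl,
            h2, renderRuns_cons, ih y]
        simp [pieceChars]

lemma renderRuns_runs (t : List Int) (x : Int) :
    renderRuns (runs (x :: t)) = PySem.Int.toChars x ++ bTail x t := by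
  rw [runs, renderRuns_cons, bTail_eq]
  simp [pieceChars]

lemma join_renderRuns (rs : List (Int × Int)) :
    PySem.Chars.join [','] (rs.map pieceChars) = renderRuns rs := by
  match rs with
  | [] => simp [PySem.Chars.join_nil, renderRuns]
  | [p] => simp [PySem.Chars.join_singleton, renderRuns]
  | p :: q :: rs =>
      rw [List.map_cons, List.map_cons, PySem.Chars.join_cons_cons, ← List.map_cons, renderRuns]
      rw [join_renderRuns (q :: rs)]
      simp

theorem main_eq (resids : List Int) : get_domain_range resids = get_domain_range_alt resids := by
  rcases heq : PySem.List.sorted resids (fun x => x) false with _ | ⟨x, t⟩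
  · simp only [get_domain_range, get_domain_range_alt, sorted_set_eq_dedupAdj, heq]
    rfl
  · have hp : (x :: t).Pairwise (· ≤ ·) := by
      have := PySem.List.sorted_pairwise resids (fun x => x)
      rw [heq] at this; exact this
    have hpieces : pieces (List.foldl aStep [[x]] t) = runs (dedupAdj (x :: t)) := by
      rw [fold_pieces t x []]
      rw [show ((x :: ([] : List Int)).getLastD 0) = x from rfl]
      rw [show ((x, (eatA x t).1) :: runsA (eatA x t).2) = runsA (x :: t) from (by rw [runsA])]
      exact runsA_eq_runs_aux (x :: t).length (x :: t) le_rfl hp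
    have hA : get_domain_range resids = String.ofList (renderRuns (runs (dedupAdj (x :: t)))) := by
      simp only [get_domain_range, heq]
      rw [show List.foldl aStep [] (x :: t) = List.foldl aStep [[x]] t from rfl]
      rw [PySem.List.foldl_append_singleton_eq_map
        (fun (seg : List Int) => String.ofList (PySem.Int.toChars (seg.getLastD 0) ++ '-' :: PySem.Int.toChars (seg.headD 0)))]
      rw [List.nil_append]
      rw [show (List.foldl aStep [[x]] t).reverse.map
            (fun seg => String.ofList (PySem.Int.toChars (seg.getLastD 0) ++ '-' :: PySem.Int.toChars (seg.headD 0)))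
          = (pieces (List.foldl aStep [[x]] t)).map (fun p => String.ofList (pieceChars p)) from (by
            simp [pieces, pieceChars, List.map_map])]
      rw [hpieces]
      have hT : (PySem.Str.join "," ((runs (dedupAdj (x :: t))).map (fun p => String.ofList (pieceChars p)))).toList
          = renderRuns (runs (dedupAdj (x :: t))) := by
        rw [PySem.Str.toList_join]
        rw [List.map_map]
        rw [show (String.toList ∘ fun p => String.ofList (pieceChars p)) = pieceChars from (by
          funext p; simp)]
        exact join_renderRuns _
      rw [← hT, String.ofList_toList]
    have hB : get_domain_range_alt resids = String.ofList (renderRuns (runs (x :: dd x t))) := by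
      have hu : PySem.List.sorted (PySem.Set.ofList resids) (fun x => x) false = x :: dd x t := by
        rw [sorted_set_eq_dedupAdj, heq]; rfl
      simp only [get_domain_range_alt, hu]
      rw [if_neg (List.cons_ne_nil x (dd x t))]
      rw [show (x :: dd x t).tail = dd x t from rfl,
          show (x :: dd x t).headD 0 = x from rfl]
      rw [bfold (dd x t) x (PySem.Int.toChars x), renderRuns_runs]
    rw [hA, hB]
    rfl

-- ===== VERDICT (by name: the statement is the Claim_ definition above) =====
theorem get_domain_range_spec : Claim_equal_get_domain_range := by
  intro resids _
  exact main_eq resids
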